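-- pv_equiv track=rewrite | github.com/dariusp1/vinyl-shop | scripts/fill_tracks_discogs.py | replace_player
-- ===== SOURCE A (Python) =====
-- def replace_player(content, new_player):
--     marker = '<div class="player-section">'
--     start  = content.find(marker)
--     if start == -1:
--         return content
--     depth, i = 0, start
--     while i < len(content):
--         if content[i:i+4] == "<div":   depth += 1; i += 4
--         elif content[i:i+6] == "</div>": depth -= 1; i += 6
--         else: i += 1
--         if depth == 0: break
--     return content[:start] + new_player + content[i:]
-- ===== SOURCE B (Python) =====
-- def replace_player(content, new_player):
--     marker = '<div class="player-section">'
--     start = content.find(marker)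
--     if start == -1:
--         return content
--     depth, i, n = 0, start, len(content)
--     while i < n:
--         o = content.find('<div', i)
--         c = content.find('</div>', i)
--         if o == -1 and c == -1:
--             i = n
--             break
--         if c == -1 or (o != -1 and o < c):
--             depth += 1
--             i = o + 4
--         else:
--             depth -= 1
--             i = c + 6
--             if depth == 0:
--                 break
--     return content[:start] + new_player + content[i:]
-- ===== Notes on version B (the rewrite author's own statement) =====
-- stated objective: alternative
-- what changed: Replaced A's char-by-char depth scan with a jump scan that leaps between tag boundaries using str.find('<div', i)/str.find('</div>', i), updating depth only at tags and splicing at the same end index.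
import Mathlib
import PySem

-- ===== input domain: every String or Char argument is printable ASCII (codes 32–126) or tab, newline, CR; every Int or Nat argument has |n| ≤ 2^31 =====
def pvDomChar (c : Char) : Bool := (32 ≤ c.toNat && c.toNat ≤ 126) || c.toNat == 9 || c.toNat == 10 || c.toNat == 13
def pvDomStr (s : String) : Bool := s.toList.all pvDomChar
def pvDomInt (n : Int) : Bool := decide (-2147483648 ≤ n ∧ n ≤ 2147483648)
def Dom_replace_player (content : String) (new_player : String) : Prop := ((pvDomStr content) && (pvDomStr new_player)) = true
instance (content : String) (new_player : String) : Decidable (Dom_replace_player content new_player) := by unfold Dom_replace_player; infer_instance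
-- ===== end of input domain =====

-- B replaces A's char-by-char depth scan with a jump scan over tag boundaries via str.find (alternative decomposition; same return value).

-- ===== PORT A =====
-- A's while loop: char-by-char scan keeping (depth, i); returns the final i.
def pvALoop (cs : List Char) (depth : Int) (i : Nat) : Nat :=
  if h : i < cs.length then
    if (cs.drop i).take 4 = "<div".toList then
      if depth + 1 = 0 then i + 4 else pvALoop cs (depth + 1) (i + 4)
    else if (cs.drop i).take 6 = "</div>".toList then
      if depth - 1 = 0 then i + 6 else pvALoop cs (depth - 1) (i + 6)
    else
      if depth = 0 then i + 1 else pvALoop cs depth (i + 1)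
  else i
termination_by cs.length - i
decreasing_by all_goals omega

def replace_player (content : String) (new_player : String) : String :=
  let start := PySem.Str.find content "<div class=\"player-section\">"
  if start = -1 then content
  else
    let i := pvALoop content.toList 0 start.toNat
    PySem.Str.slice content none (some start) ++ new_player ++ PySem.Str.slice content (some (i : Int)) none

-- ===== PORT B =====
-- B's while loop: jump from tag to tag using find(sub, i); returns the final i.
def pvBLoop (cs : List Char) (depth : Int) (i : Nat) : Nat :=
  if h : i < cs.length then
    let o := PySem.Chars.findFrom cs "<div".toList (i : Int)
    let c := PySem.Chars.findFrom cs "</div>".toList (i : Int)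
    if hoc : o = -1 ∧ c = -1 then cs.length
    else if hop : c = -1 ∨ (o ≠ -1 ∧ o < c) then
      pvBLoop cs (depth + 1) (o.toNat + 4)
    else
      if depth - 1 = 0 then c.toNat + 6 else pvBLoop cs (depth - 1) (c.toNat + 6)
  else i
termination_by cs.length - i
decreasing_by
  · have ho : PySem.Chars.findFrom cs "<div".toList (i : Int) ≠ -1 := by
      rcases hop with h1 | h2
      · exact fun ha => hoc ⟨ha, h1⟩
      · exact h2.1
    have := (PySem.Chars.findFrom_natCast_spec cs "<div".toList i (Nat.le_of_lt h) ho).1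
    omega
  · have hc : PySem.Chars.findFrom cs "</div>".toList (i : Int) ≠ -1 := by
      intro ha; exact hop (Or.inl ha)
    have := (PySem.Chars.findFrom_natCast_spec cs "</div>".toList i (Nat.le_of_lt h) hc).1
    omega

def replace_player_alt (content : String) (new_player : String) : String :=
  let start := PySem.Str.find content "<div class=\"player-section\">"
  if start = -1 then content
  else
    let i := pvBLoop content.toList 0 start.toNat
    PySem.Str.slice content none (some start) ++ new_player ++ PySem.Str.slice content (some (i : Int)) none

-- ===== PRECONDITION & SPEC =====
def Spec_replace_player (content : String) (new_player : String) (out : String) : Prop := out = replace_player_alt content new_player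
instance (content : String) (new_player : String) (out : String) : Decidable (Spec_replace_player content new_player out) := by unfold Spec_replace_player; infer_instance

-- ===== CLAIM (what is proved, stated in full; the proofs are below) =====
def Claim_equal_replace_player : Prop := ∀ (content : String) (new_player : String), Dom_replace_player content new_player → Spec_replace_player content new_player (replace_player content new_player)

-- ===== LEMMAS AND PROOFS =====

def pvOpenAt (cs : List Char) (j : Nat) : Prop := "<div".toList <+: cs.drop j
def pvCloseAt (cs : List Char) (j : Nat) : Prop := "</div>".toList <+: cs.drop j

lemma pvNotBoth (cs : List Char) (j : Nat) : ¬ (pvOpenAt cs j ∧ pvCloseAt cs j) := by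
  rintro ⟨⟨t1, e1⟩, ⟨t2, e2⟩⟩
  have : "<div".toList ++ t1 = "</div>".toList ++ t2 := e1.trans e2.symm
  simp at this

lemma pvOpen_iff (cs : List Char) (i : Nat) :
    ((cs.drop i).take 4 = "<div".toList) ↔ pvOpenAt cs i := by
  rw [pvOpenAt, List.prefix_iff_eq_take]
  constructor <;> intro h <;> simpa using h.symm

lemma pvClose_iff (cs : List Char) (i : Nat) :
    ((cs.drop i).take 6 = "</div>".toList) ↔ pvCloseAt cs i := by
  rw [pvCloseAt, List.prefix_iff_eq_take]
  constructor <;> intro h <;> simpa using h.symm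

lemma pvOpenAt_lt (cs : List Char) (j : Nat) (h : pvOpenAt cs j) : j < cs.length := by
  have := h.length_le
  simp at this
  omega

lemma pvCloseAt_lt (cs : List Char) (j : Nat) (h : pvCloseAt cs j) : j < cs.length := by
  have := h.length_le
  simp at this
  omega

-- a prefix of cs.drop j (j ≥ i) is an infix of cs.drop i
lemma pvInfix_drop {sub cs : List Char} {i j : Nat} (hij : i ≤ j) (h : sub <+: cs.drop j) :
    sub <:+: cs.drop i := by
  rcases h with ⟨r, hr⟩
  refine ⟨(cs.drop i).take (j - i), r, ?_⟩
  have : (cs.drop i).drop (j - i) = cs.drop j := by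
    rw [List.drop_drop]; congr 1; omega
  calc (cs.drop i).take (j - i) ++ sub ++ r
      = (cs.drop i).take (j - i) ++ (sub ++ r) := by rw [List.append_assoc]
    _ = (cs.drop i).take (j - i) ++ (cs.drop i).drop (j - i) := by rw [this, hr]
    _ = cs.drop i := List.take_append_drop _ _

lemma pvNoPrefix_of_not_infix {sub cs : List Char} {i j : Nat}
    (h : ¬ sub <:+: cs.drop i) (hij : i ≤ j) : ¬ sub <+: cs.drop j :=
  fun hp => h (pvInfix_drop hij hp)

-- A's scan walks through a tag-free region unchanged
lemma pvALoop_skip (cs : List Char) (p : Nat) (hp : p ≤ cs.length) :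
    ∀ (k i : Nat) (depth : Int), p - i ≤ k → i ≤ p → depth ≠ 0 →
    (∀ j, i ≤ j → j < p → ¬ pvOpenAt cs j ∧ ¬ pvCloseAt cs j) →
    pvALoop cs depth i = pvALoop cs depth p := by
  intro k
  induction k with
  | zero =>
    intro i depth hk hip _ _
    have : i = p := by omega
    rw [this]
  | succ k ih =>
    intro i depth hk hip hd hno
    by_cases hi : i = p
    · rw [hi]
    · have hilt : i < p := by omega
      have hno_i := hno i (le_refl i) hilt
      rw [pvALoop]
      rw [dif_pos (by omega : i < cs.length)]
      rw [if_neg (fun h => hno_i.1 ((pvOpen_iff cs i).mp h))]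
      rw [if_neg (fun h => hno_i.2 ((pvClose_iff cs i).mp h))]
      rw [if_neg hd]
      exact ih (i + 1) depth (by omega) (by omega) hd
        (fun j hj hj' => hno j (by omega) hj')

-- the main equivalence of the two loops, for positive depth
lemma pvLoop_eq (cs : List Char) :
    ∀ (k i : Nat) (depth : Int), cs.length - i ≤ k → 1 ≤ depth →
    pvALoop cs depth i = pvBLoop cs depth i := by
  intro k
  induction k with
  | zero =>
    intro i depth hk _
    rw [pvALoop, pvBLoop, dif_neg (by omega), dif_neg (by omega)]
  | succ k ih =>
    intro i depth hk hd
    by_cases hi : i < cs.length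
    case neg => rw [pvALoop, pvBLoop, dif_neg hi, dif_neg hi]
    case pos =>
    have hile : i ≤ cs.length := Nat.le_of_lt hi
    set o := PySem.Chars.findFrom cs "<div".toList (i : Int) with ho_def
    set c := PySem.Chars.findFrom cs "</div>".toList (i : Int) with hc_def
    have hBstep : pvBLoop cs depth i =
        if o = -1 ∧ c = -1 then cs.length
        else if c = -1 ∨ (o ≠ -1 ∧ o < c) then pvBLoop cs (depth + 1) (o.toNat + 4)
        else if depth - 1 = 0 then c.toNat + 6 else pvBLoop cs (depth - 1) (c.toNat + 6) := by
      rw [pvBLoop, dif_pos hi]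
      simp only [dite_eq_ite]
      rw [← ho_def, ← hc_def]
    -- facts about o and c
    have hOnone : o = -1 → ∀ j, i ≤ j → ¬ pvOpenAt cs j := by
      intro h j hj
      have := (PySem.Chars.findFrom_natCast_eq_neg_one_iff cs "<div".toList i hile).mp h
      exact pvNoPrefix_of_not_infix this hj
    have hCnone : c = -1 → ∀ j, i ≤ j → ¬ pvCloseAt cs j := by
      intro h j hj
      have := (PySem.Chars.findFrom_natCast_eq_neg_one_iff cs "</div>".toList i hile).mp h
      exact pvNoPrefix_of_not_infix this hj
    have hOspec := PySem.Chars.findFrom_natCast_spec cs "<div".toList i hile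
    have hCspec := PySem.Chars.findFrom_natCast_spec cs "</div>".toList i hile
    by_cases hboth : o = -1 ∧ c = -1
    · -- no tags at all: A walks to the end
      rw [hBstep, if_pos hboth]
      rw [pvALoop_skip cs cs.length (le_refl _) (cs.length - i) i depth (by omega) hile
            (by omega)
            (fun j hj _ => ⟨hOnone hboth.1 j hj, hCnone hboth.2 j hj⟩)]
      rw [pvALoop, dif_neg (by omega)]
    · rw [hBstep, if_neg hboth]
      by_cases hop : c = -1 ∨ (o ≠ -1 ∧ o < c)
      · -- next tag is an open
        rw [if_pos hop]
        have hone : o ≠ -1 := by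
          rcases hop with h1 | h2
          · exact fun ha => hboth ⟨ha, h1⟩
          · exact h2.1
        obtain ⟨hio, hopre, homin⟩ := hOspec hone
        have hopen : pvOpenAt cs o.toNat := hopre
        have hnoclose : ∀ j, i ≤ j → j < o.toNat → ¬ pvCloseAt cs j := by
          intro j hj hj'
          rcases hop with h1 | h2
          · exact hCnone h1 j hj
          · obtain ⟨_, hcmin⟩ := hCspec (by intro ha; rw [hc_def, ha] at h2; omega)
            exact hcmin.2 j hj (by omega)
        have hAskip := pvALoop_skip cs o.toNat (pvOpenAt_lt cs o.toNat hopen).le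
          (o.toNat - i) i depth (by omega) (by omega) (by omega)
          (fun j hj hj' => ⟨homin j hj hj', hnoclose j hj hj'⟩)
        rw [hAskip, pvALoop, dif_pos (pvOpenAt_lt cs o.toNat hopen),
            if_pos ((pvOpen_iff cs o.toNat).mpr hopen), if_neg (by omega)]
        exact ih (o.toNat + 4) (depth + 1) (by omega) (by omega)
      · -- next tag is a close
        rw [if_neg hop]
        have hcne : c ≠ -1 := fun ha => hop (Or.inl ha)
        obtain ⟨hic, hcpre, hcmin⟩ := hCspec hcne
        have hclose : pvCloseAt cs c.toNat := hcpre
        have hco : o ≠ -1 → c ≤ o := by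
          intro hone
          have := hOspec hone
          by_contra hlt
          exact hop (Or.inr ⟨hone, by omega⟩)
        have hnoopen : ∀ j, i ≤ j → j ≤ c.toNat → ¬ pvOpenAt cs j := by
          intro j hj hj' hopn
          by_cases hone : o = -1
          · exact hOnone hone j hj hopn
          · obtain ⟨hio, hopre, homin⟩ := hOspec hone
            have hcleo := hco hone
            by_cases hje : j = c.toNat ∧ c.toNat = o.toNat
            · exact pvNotBoth cs c.toNat ⟨hje.2 ▸ hopre, hclose⟩
            · have : j < o.toNat := by
                rcases Nat.lt_or_ge j o.toNat with h | h
                · exact h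
                · exfalso
                  have : j = o.toNat := by omega
                  have : j = c.toNat := by omega
                  exact hje ⟨this, by omega⟩
              exact homin j hj this hopn
        have hAskip := pvALoop_skip cs c.toNat (pvCloseAt_lt cs c.toNat hclose).le
          (c.toNat - i) i depth (by omega) (by omega) (by omega)
          (fun j hj hj' => ⟨hnoopen j hj (by omega), hcmin j hj hj'⟩)
        rw [hAskip, pvALoop, dif_pos (pvCloseAt_lt cs c.toNat hclose),
            if_neg (fun h => hnoopen c.toNat (by omega) (le_refl _) ((pvOpen_iff cs c.toNat).mp h)),
            if_pos ((pvClose_iff cs c.toNat).mpr hclose)]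
        by_cases hz : depth - 1 = 0
        · rw [if_pos hz, if_pos hz]
        · rw [if_neg hz, if_neg hz]
          exact ih (c.toNat + 6) (depth - 1) (by omega) (by omega)

-- ===== VERDICT (by name: the statement is the Claim_ definition above) =====
theorem replace_player_spec : Claim_equal_replace_player := by
  intro content new_player _
  unfold Spec_replace_player replace_player replace_player_alt
  set start := PySem.Str.find content "<div class=\"player-section\">" with hs_def
  by_cases hs : start = -1
  · simp [hs]
  · rw [if_neg hs, if_neg hs]
    have hs0 : 0 ≤ start := by
      have := PySem.Chars.neg_one_le_find content.toList "<div class=\"player-section\">".toList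
      simp only [hs_def, PySem.Str.find_eq] at *
      omega
    have hspec := PySem.Chars.find_spec (s := content.toList)
      (sub := "<div class=\"player-section\">".toList)
      (by simpa [PySem.Str.find_eq] using hs0)
    set cs := content.toList with hcs
    have hstartNat : (PySem.Chars.find cs "<div class=\"player-section\">".toList).toNat = start.toNat := by
      simp only [hs_def, PySem.Str.find_eq]
      rw [hcs]
    have hmark : "<div class=\"player-section\">".toList <+: cs.drop start.toNat := by
      rw [← hstartNat]; exact hspec.1
    have hopen : pvOpenAt cs start.toNat :=
      List.IsPrefix.trans (by decide) hmark
    have hlt : start.toNat < cs.length := pvOpenAt_lt cs start.toNat hopen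
    have hile : start.toNat ≤ cs.length := hlt.le
    -- first iteration of A: the marker opens a div
    have hA : pvALoop cs 0 start.toNat = pvALoop cs 1 (start.toNat + 4) := by
      rw [pvALoop, dif_pos hlt, if_pos ((pvOpen_iff cs start.toNat).mpr hopen),
          if_neg (by omega)]
      norm_num
    -- first iteration of B: the first open found is the marker itself
    set o := PySem.Chars.findFrom cs "<div".toList (start.toNat : Int) with ho_def
    set c := PySem.Chars.findFrom cs "</div>".toList (start.toNat : Int) with hc_def
    have hone : o ≠ -1 := by
      intro h
      exact pvNoPrefix_of_not_infix
        ((PySem.Chars.findFrom_natCast_eq_neg_one_iff cs "<div".toList start.toNat hile).mp h)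
        (le_refl start.toNat) hopen
    obtain ⟨hio, hopre, homin⟩ := PySem.Chars.findFrom_natCast_spec cs "<div".toList start.toNat hile hone
    have hoeq : o = (start.toNat : Int) := by
      by_contra hne
      have : start.toNat < o.toNat := by omega
      exact homin start.toNat (le_refl _) this hopen
    have hocgt : c ≠ -1 → o < c := by
      intro hcne
      obtain ⟨hic, hcpre, _⟩ := PySem.Chars.findFrom_natCast_spec cs "</div>".toList start.toNat hile hcne
      have : c.toNat ≠ start.toNat := by
        intro h
        exact pvNotBoth cs start.toNat ⟨hopen, h ▸ hcpre⟩
      omega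
    have hB : pvBLoop cs 0 start.toNat = pvBLoop cs 1 (o.toNat + 4) := by
      rw [pvBLoop, dif_pos hlt]
      rw [dif_neg (by rintro ⟨h1, _⟩; exact hone h1)]
      rw [dif_pos (by
        by_cases hcne : c = -1
        · exact Or.inl hcne
        · exact Or.inr ⟨hone, hocgt hcne⟩)]
      rw [← ho_def]
      norm_num
    have hloop : pvALoop cs 0 start.toNat = pvBLoop cs 0 start.toNat := by
      rw [hA, hB, hoeq]
      exact pvLoop_eq cs (cs.length - (start.toNat + 4)) (start.toNat + 4) 1 (le_refl _) (le_refl _)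
    rw [hloop]
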